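-- pv_equiv track=rewrite | github.com/GUNH003/lit_review_fullstack_rag_system | rag/parser.py | page_text_handler_distributed_computing
-- ===== SOURCE A (Python) =====
-- def page_text_handler_distributed_computing(text: str) -> str:
--     newline_count = 0
--     index = -1
--     for i, char in enumerate(text):
--         if char == '\n':
--             newline_count += 1
--             if newline_count == 2:
--                 index = i
--                 break
--     if index != -1:
--         return text[index + 1:]
--     return text
-- ===== SOURCE B (Python) =====
-- def page_text_handler_distributed_computing(text: str) -> str:
--     def _after_first_newline(s):
--         i = s.find('\n')
--         if i == -1:
--             return None
--         return s[i + 1:]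
--
--     rest = _after_first_newline(text)
--     if rest is None:
--         return text
--     tail = _after_first_newline(rest)
--     if tail is None:
--         return text
--     return tail
-- ===== Notes on version B (the rewrite author's own statement) =====
-- stated objective: simpler
-- what changed: Replaces the single counting scan (enumerate, newline counter, break, slice at the found index) with two staged applications of a helper that returns the text following the first newline via str.find, each stage producing an intermediate suffix string.
import Mathlib
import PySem

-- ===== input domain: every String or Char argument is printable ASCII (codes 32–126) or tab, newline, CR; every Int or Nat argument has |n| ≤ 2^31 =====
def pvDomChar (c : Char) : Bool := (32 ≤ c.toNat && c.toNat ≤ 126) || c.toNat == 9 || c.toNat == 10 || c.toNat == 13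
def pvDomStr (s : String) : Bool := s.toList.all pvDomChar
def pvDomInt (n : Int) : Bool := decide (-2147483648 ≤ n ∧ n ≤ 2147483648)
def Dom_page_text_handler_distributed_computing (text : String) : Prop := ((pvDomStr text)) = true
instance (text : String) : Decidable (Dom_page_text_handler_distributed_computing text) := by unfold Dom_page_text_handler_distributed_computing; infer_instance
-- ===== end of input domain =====

-- B decomposes the task into two staged applications of a take-the-text-after-the-first-newline
-- helper built on str.find, instead of A's single counting scan with a break; objective: simpler.


-- ===== PORT A =====
-- the for-loop of A (enumerate with break), carrying the running index i and newline_count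
def pvFindA : List Char → Int → Int → Int
  | [], _, _ => -1
  | c :: cs, i, cnt =>
    if c = '\n' then
      if cnt + 1 = 2 then i else pvFindA cs (i + 1) (cnt + 1)
    else pvFindA cs (i + 1) cnt

def page_text_handler_distributed_computing (text : String) : String :=
  let index := pvFindA text.toList 0 0
  if index ≠ -1 then String.ofList (PySem.List.slice text.toList (some (index + 1)) none)
  else text

-- ===== PORT B =====
-- Source B's helper _after_first_newline: s.find('\n'), None if -1, else s[i+1:]
def pvAfterFirstNewline (s : String) : Option String :=
  let i := PySem.Str.find s "\n"
  if i = -1 then none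
  else some (String.ofList (PySem.List.slice s.toList (some (i + 1)) none))

def page_text_handler_distributed_computing_alt (text : String) : String :=
  match pvAfterFirstNewline text with
  | none => text
  | some rest =>
    match pvAfterFirstNewline rest with
    | none => text
    | some tail => tail

-- ===== PRECONDITION & SPEC =====
def Spec_page_text_handler_distributed_computing (text : String) (out : String) : Prop := out = page_text_handler_distributed_computing_alt text
instance (text : String) (out : String) : Decidable (Spec_page_text_handler_distributed_computing text out) := by unfold Spec_page_text_handler_distributed_computing; infer_instance

-- ===== CLAIM (what is proved, stated in full; the proofs are below) =====
def Claim_equal_page_text_handler_distributed_computing : Prop := ∀ (text : String), Dom_page_text_handler_distributed_computing text → Spec_page_text_handler_distributed_computing text (page_text_handler_distributed_computing text)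

-- ===== LEMMAS AND PROOFS =====

-- the suffix after the first '\n', if any (characterises both ports)
def pvDrop1 : List Char → Option (List Char)
  | [] => none
  | c :: cs => if c = '\n' then some cs else pvDrop1 cs

theorem pvDrop1_length : ∀ {l v : List Char}, pvDrop1 l = some v → v.length < l.length := by
  intro l
  induction l with
  | nil => intro v h; simp [pvDrop1] at h
  | cons c cs ih =>
    intro v h
    simp only [pvDrop1] at h
    by_cases hc : c = '\n'
    · simp [hc] at h; subst h; simp
    · simp [hc] at h; exact Nat.lt_trans (ih h) (by simp)

theorem pvDrop1_none_iff : ∀ {l : List Char}, pvDrop1 l = none ↔ '\n' ∉ l := by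
  intro l
  induction l with
  | nil => simp [pvDrop1]
  | cons c cs ih =>
    by_cases hc : c = '\n'
    · simp [pvDrop1, hc]
    · simp [pvDrop1, hc, ih, Ne.symm hc]

-- pvDrop1 l = some v locates the FIRST newline: drop j = '\n'::v at j = |l|-|v|-1, nothing before
theorem pvDrop1_spec : ∀ {l v : List Char}, pvDrop1 l = some v →
    l.drop (l.length - v.length - 1) = '\n' :: v ∧
    ∀ i < l.length - v.length - 1, ¬ (['\n'] <+: l.drop i) := by
  intro l
  induction l with
  | nil => intro v h; simp [pvDrop1] at h
  | cons c cs ih =>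
    intro v h
    simp only [pvDrop1] at h
    by_cases hc : c = '\n'
    · simp [hc] at h
      subst h
      have h0 : (c :: cs).length - cs.length - 1 = 0 := by simp
      rw [h0]
      exact ⟨by simp [hc], fun i hi => absurd hi (by omega)⟩
    · simp [hc] at h
      have hlen := pvDrop1_length h
      obtain ⟨hd, hmin⟩ := ih h
      have hj : (c :: cs).length - v.length - 1 = (cs.length - v.length - 1) + 1 := by
        simp; omega
      rw [hj]
      refine ⟨by simpa using hd, ?_⟩
      intro i hi hp
      cases i with
      | zero =>
        simp at hp
        exact hc hp.symm
      | succ i' =>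
        exact hmin i' (by omega) (by simpa using hp)

-- Chars.find on ['\n'] computes exactly pvDrop1's index
theorem pvFind_eq_pvDrop1 : ∀ (l : List Char),
    PySem.Chars.find l ['\n'] = match pvDrop1 l with
      | none => -1
      | some v => ((l.length - v.length - 1 : Nat) : Int) := by
  intro l
  cases h : pvDrop1 l with
  | none =>
    simp only
    rw [PySem.Chars.find_eq_neg_one_iff]
    intro hinf
    have : '\n' ∈ l := hinf.subset (by simp)
    exact (pvDrop1_none_iff.mp h) this
  | some v =>
    simp only
    obtain ⟨hd, hmin⟩ := pvDrop1_spec h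
    have hlen := pvDrop1_length h
    set j : Nat := l.length - v.length - 1 with hj
    have hpj : ['\n'] <+: l.drop j := by rw [hd]; simp
    have hinf : ['\n'] <:+: l := hpj.isInfix.trans (l.drop_suffix j).isInfix
    have hnn : 0 ≤ PySem.Chars.find l ['\n'] := (PySem.Chars.find_nonneg_iff l ['\n']).mpr hinf
    obtain ⟨hfp, hfmin⟩ := PySem.Chars.find_spec hnn
    have hjeq : (PySem.Chars.find l ['\n']).toNat = j := by
      by_contra hne
      rcases Nat.lt_or_ge (PySem.Chars.find l ['\n']).toNat j with hlt | hge
      · exact hmin _ hlt hfp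
      · exact hfmin j (by omega) hpj
    calc PySem.Chars.find l ['\n'] = ((PySem.Chars.find l ['\n']).toNat : Int) := (Int.toNat_of_nonneg hnn).symm
      _ = (j : Int) := by rw [hjeq]

-- pvAfterFirstNewline through toList is pvDrop1
theorem pvAfter_eq : ∀ (s : String),
    pvAfterFirstNewline s = (pvDrop1 s.toList).map String.ofList := by
  intro s
  unfold pvAfterFirstNewline
  have hf : PySem.Str.find s "\n" = PySem.Chars.find s.toList ['\n'] := by
    simp [PySem.Str.find_eq]
  rw [hf, pvFind_eq_pvDrop1]
  cases h : pvDrop1 s.toList with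
  | none => simp
  | some v =>
    have hlen := pvDrop1_length h
    obtain ⟨hd, _⟩ := pvDrop1_spec h
    have hne : ((s.toList.length - v.length - 1 : Nat) : Int) ≠ -1 := by omega
    have harg : ((s.toList.length - v.length - 1 : Nat) : Int) + 1
        = ((s.toList.length - v.length : Nat) : Int) := by omega
    have hdrop : s.toList.drop (s.toList.length - v.length) = v := by
      have he : s.toList.length - v.length = (s.toList.length - v.length - 1) + 1 := by omega
      rw [he, ← List.drop_drop, hd]
      simp
    rw [if_neg hne, harg, PySem.List.slice_from_natCast, hdrop, Option.map_some]

-- A's initial loop call once the first newline has been consumed (newline_count = 1)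
theorem pvFindA_one : ∀ (l : List Char) (i : Int),
    pvFindA l i 1 = match pvDrop1 l with
      | none => -1
      | some v => i + l.length - v.length - 1 := by
  intro l
  induction l with
  | nil => intro i; simp [pvFindA, pvDrop1]
  | cons c cs ih =>
    intro i
    by_cases hc : c = '\n'
    · simp [pvFindA, pvDrop1, hc]; ring
    · simp only [pvFindA, pvDrop1, hc, if_false]
      rw [ih]
      cases h : pvDrop1 cs with
      | none => simp [h]
      | some v => simp [h]; ring

-- A's loop from the start: the index of the second newline via two pvDrop1 steps
theorem pvFindA_zero : ∀ (l : List Char) (i : Int),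
    pvFindA l i 0 = match pvDrop1 l with
      | none => -1
      | some u => match pvDrop1 u with
        | none => -1
        | some v => i + l.length - v.length - 1 := by
  intro l
  induction l with
  | nil => intro i; simp [pvFindA, pvDrop1]
  | cons c cs ih =>
    intro i
    by_cases hc : c = '\n'
    · simp only [pvFindA, pvDrop1, hc]
      norm_num
      rw [pvFindA_one]
      cases h : pvDrop1 cs with
      | none => simp [h]
      | some v => simp [h]; ring
    · simp only [pvFindA, pvDrop1, hc]
      rw [ih]
      cases h : pvDrop1 cs with
      | none => simp [h]
      | some u =>
        simp only [h]
        cases h2 : pvDrop1 u with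
        | none => simp [h2]
        | some v => simp [h2]; ring

theorem pvDrop1_drop : ∀ {l v : List Char}, pvDrop1 l = some v → l.drop (l.length - v.length) = v := by
  intro l v h
  obtain ⟨hd, _⟩ := pvDrop1_spec h
  have hlen := pvDrop1_length h
  have : l.length - v.length = (l.length - v.length - 1) + 1 := by omega
  rw [this, ← List.drop_drop, hd]
  simp

theorem pvDrop2_drop {l u v : List Char} (h1 : pvDrop1 l = some u) (h2 : pvDrop1 u = some v) :
    l.drop (l.length - v.length) = v := by
  have d1 := pvDrop1_drop h1
  have d2 := pvDrop1_drop h2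
  have l1 := pvDrop1_length h1
  have l2 := pvDrop1_length h2
  have key : List.drop (u.length - v.length) (List.drop (l.length - u.length) l) = v := by
    rw [d1, d2]
  rw [List.drop_drop] at key
  have he : l.length - v.length = l.length - u.length + (u.length - v.length) := by omega
  rw [he]
  exact key

-- ===== VERDICT (by name: the statement is the Claim_ definition above) =====
theorem page_text_handler_distributed_computing_spec : Claim_equal_page_text_handler_distributed_computing := by
  intro text _
  unfold Spec_page_text_handler_distributed_computing
  unfold page_text_handler_distributed_computing page_text_handler_distributed_computing_alt
  set l := text.toList with hl
  rw [pvAfter_eq, pvFindA_zero]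
  cases h1 : pvDrop1 l with
  | none => simp
  | some u =>
    simp only [Option.map_some]
    have hu : (String.ofList u).toList = u := by simp
    rw [pvAfter_eq, hu]
    cases h2 : pvDrop1 u with
    | none => simp
    | some v =>
      have lu := pvDrop1_length h1
      have uv := pvDrop1_length h2
      simp only [Option.map_some]
      rw [if_pos (by omega : (0 : Int) + l.length - v.length - 1 ≠ -1)]
      have harg : (0 : Int) + l.length - v.length - 1 + 1 = ((l.length - v.length : Nat) : Int) := by omega
      rw [harg, PySem.List.slice_from_natCast, pvDrop2_drop h1 h2]
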